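-- pv_equiv track=rewrite | github.com/dhaliwalg/thymus | scripts/extract-imports.py | _strip_go_comments
-- ===== SOURCE A (Python) =====
-- def _strip_go_comments(content):
--     """Strip Go comments, preserving string content and line structure.
--
--     Handles:
--     - Line comments: // through end of line
--     - Block comments: /* ... */ (no nesting in Go)
--     - Double-quoted strings: "..." with \\ escape sequences (preserved)
--     - Raw strings (backtick): `...` — no escapes (preserved)
--     - Rune literals: '...' with \\ escape sequences (preserved)
--
--     Only comment content is blanked. String content is preserved so that
--     line-level import detection can distinguish code from strings.
--     """
--     out = list(content)
--     i = 0
--     n = len(content)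
--     # States: 0=code, 1=line_comment, 2=block_comment,
--     #         3=double_string, 4=raw_string, 5=rune_literal
--     state = 0
--
--     while i < n:
--         ch = content[i]
--
--         if state == 0:  # code
--             if ch == '/' and i + 1 < n:
--                 nch = content[i + 1]
--                 if nch == '/':
--                     out[i] = ' '; out[i + 1] = ' '
--                     state = 1
--                     i += 2; continue
--                 if nch == '*':
--                     out[i] = ' '; out[i + 1] = ' '
--                     state = 2
--                     i += 2; continue
--             if ch == '"':
--                 state = 3
--             elif ch == '`':
--                 state = 4
--             elif ch == "'":
--                 state = 5
--             i += 1
--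
--         elif state == 1:  # line comment
--             if ch == '\n':
--                 state = 0
--             else:
--                 out[i] = ' '
--             i += 1
--
--         elif state == 2:  # block comment
--             if ch == '*' and i + 1 < n and content[i + 1] == '/':
--                 out[i] = ' '; out[i + 1] = ' '
--                 state = 0
--                 i += 2; continue
--             if ch != '\n':
--                 out[i] = ' '
--             i += 1
--
--         elif state == 3:  # double-quoted string (preserved)
--             if ch == '\\' and i + 1 < n:
--                 i += 2; continue
--             if ch == '"':
--                 state = 0
--             i += 1
--
--         elif state == 4:  # raw string (preserved)
--             if ch == '`':
--                 state = 0
--             i += 1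
--
--         elif state == 5:  # rune literal (preserved)
--             if ch == '\\' and i + 1 < n:
--                 i += 2; continue
--             if ch == "'":
--                 state = 0
--             i += 1
--
--         else:
--             i += 1
--
--     return ''.join(out)
-- ===== SOURCE B (Python) =====
-- def _strip_go_comments(content):
--     """Strip Go comments (token-at-a-time scanner building output chunks)."""
--     n = len(content)
--     pieces = []
--     i = 0
--     while i < n:
--         ch = content[i]
--         if content.startswith('//', i):
--             j = content.find('\n', i + 2)
--             if j == -1:
--                 j = n
--             pieces.append(' ' * (j - i))
--             i = j
--         elif content.startswith('/*', i):
--             j = content.find('*/', i + 2)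
--             end = n if j == -1 else j + 2
--             pieces.append(''.join('\n' if c == '\n' else ' ' for c in content[i:end]))
--             i = end
--         elif ch == '"' or ch == "'":
--             j = i + 1
--             while j < n:
--                 c = content[j]
--                 if c == '\\' and j + 1 < n:
--                     j += 2
--                     continue
--                 j += 1
--                 if c == ch:
--                     break
--             pieces.append(content[i:j])
--             i = j
--         elif ch == '`':
--             j = content.find('`', i + 1)
--             end = n if j == -1 else j + 1
--             pieces.append(content[i:end])
--             i = end
--         else:
--             pieces.append(ch)
--             i += 1
--     return ''.join(pieces)
-- ===== Notes on version B (the rewrite author's own statement) =====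
-- stated objective: alternative
-- what changed: A is a six-state character-at-a-time machine that mutates a copy of the input in place; B is a token-at-a-time scanner that finds each comment/string token's end directly (str.find / an inner escape-aware scan) and emits whole chunks (blanked comments, verbatim strings) joined at the end.
import Mathlib
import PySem

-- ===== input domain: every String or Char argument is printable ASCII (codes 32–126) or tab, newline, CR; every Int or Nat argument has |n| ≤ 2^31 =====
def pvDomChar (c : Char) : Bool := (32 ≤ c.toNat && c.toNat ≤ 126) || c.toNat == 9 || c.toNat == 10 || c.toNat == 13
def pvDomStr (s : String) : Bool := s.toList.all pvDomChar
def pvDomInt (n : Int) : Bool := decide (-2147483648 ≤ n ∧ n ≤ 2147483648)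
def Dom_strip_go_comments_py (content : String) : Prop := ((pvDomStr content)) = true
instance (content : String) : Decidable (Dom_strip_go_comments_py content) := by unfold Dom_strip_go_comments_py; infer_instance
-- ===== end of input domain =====

-- B replaces A's char-by-char 6-state machine mutating an output array by a token-at-a-time
-- scanner that emits whole chunks (blanked comments, verbatim strings) — alternative structure, same values.

-- ===== PORT A =====
-- while-loop of _strip_go_comments: index i, state, out array updated in place (List.set)
def stripALoop (s : List Char) (n : Nat) (out : List Char) (i : Nat) (state : Nat) : List Char :=
  if h : i < n then
    let ch := s.getD i ' '
    if state = 0 then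
      if ch = '/' ∧ i + 1 < n ∧ s.getD (i+1) ' ' = '/' then
        stripALoop s n ((out.set i ' ').set (i+1) ' ') (i+2) 1
      else if ch = '/' ∧ i + 1 < n ∧ s.getD (i+1) ' ' = '*' then
        stripALoop s n ((out.set i ' ').set (i+1) ' ') (i+2) 2
      else if ch = '"' then stripALoop s n out (i+1) 3
      else if ch = '`' then stripALoop s n out (i+1) 4
      else if ch = '\'' then stripALoop s n out (i+1) 5
      else stripALoop s n out (i+1) 0
    else if state = 1 then
      if ch = '\n' then stripALoop s n out (i+1) 0
      else stripALoop s n (out.set i ' ') (i+1) 1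
    else if state = 2 then
      if ch = '*' ∧ i + 1 < n ∧ s.getD (i+1) ' ' = '/' then
        stripALoop s n ((out.set i ' ').set (i+1) ' ') (i+2) 0
      else if ch = '\n' then stripALoop s n out (i+1) 2
      else stripALoop s n (out.set i ' ') (i+1) 2
    else if state = 3 then
      if ch = '\\' ∧ i + 1 < n then stripALoop s n out (i+2) 3
      else if ch = '"' then stripALoop s n out (i+1) 0
      else stripALoop s n out (i+1) 3
    else if state = 4 then
      if ch = '`' then stripALoop s n out (i+1) 0
      else stripALoop s n out (i+1) 4
    else if state = 5 then
      if ch = '\\' ∧ i + 1 < n then stripALoop s n out (i+2) 5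
      else if ch = '\'' then stripALoop s n out (i+1) 0
      else stripALoop s n out (i+1) 5
    else stripALoop s n out (i+1) state
  else out
termination_by n - i
decreasing_by all_goals omega

def strip_go_comments_py (content : String) : String :=
  String.mk (stripALoop content.toList content.toList.length content.toList 0 0)

-- ===== PORT B =====
-- content.find(c, j) restricted to a single char needle (exact for j ≤ n)
def findCharFrom (s : List Char) (n : Nat) (c : Char) (j : Nat) : Option Nat :=
  if h : j < n then
    if s.getD j ' ' = c then some j else findCharFrom s n c (j+1)
  else none
termination_by n - j
decreasing_by all_goals omega

theorem findCharFrom_some {s : List Char} {n : Nat} {c : Char} :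
    ∀ {j m : Nat}, findCharFrom s n c j = some m → j ≤ m ∧ m < n ∧ s.getD m ' ' = c := by
  intro j m hm
  fun_induction findCharFrom s n c j with
  | case1 x h hc => simp only [Option.some.injEq] at hm; subst hm; exact ⟨le_refl _, h, hc⟩
  | case2 x h hc ih =>
      obtain ⟨h1, h2, h3⟩ := ih hm
      exact ⟨by omega, h2, h3⟩
  | case3 x h => simp at hm

-- content.find('*/', j)
def findStarSlashFrom (s : List Char) (n : Nat) (j : Nat) : Option Nat :=
  if h : j + 1 < n then
    if s.getD j ' ' = '*' ∧ s.getD (j+1) ' ' = '/' then some j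
    else findStarSlashFrom s n (j+1)
  else none
termination_by n - j
decreasing_by all_goals omega

theorem findStarSlashFrom_some {s : List Char} {n : Nat} :
    ∀ {j m : Nat}, findStarSlashFrom s n j = some m →
      j ≤ m ∧ m + 1 < n ∧ s.getD m ' ' = '*' ∧ s.getD (m+1) ' ' = '/' := by
  intro j m hm
  fun_induction findStarSlashFrom s n j with
  | case1 x h hc =>
      simp only [Option.some.injEq] at hm; subst hm; exact ⟨le_refl _, h, hc.1, hc.2⟩
  | case2 x h hc ih =>
      obtain ⟨h1, h2, h3, h4⟩ := ih hm
      exact ⟨by omega, h2, h3, h4⟩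
  | case3 x h => simp at hm

-- the inner while of B's quote branch: returns the index just past the literal
def scanQuote (s : List Char) (n : Nat) (q : Char) (j : Nat) : Nat :=
  if h : j < n then
    let c := s.getD j ' '
    if c = '\\' ∧ j + 1 < n then scanQuote s n q (j+2)
    else if c = q then j + 1
    else scanQuote s n q (j+1)
  else j
termination_by n - j
decreasing_by all_goals omega

theorem scanQuote_ge {s : List Char} {n : Nat} {q : Char} : ∀ {j : Nat}, j ≤ scanQuote s n q j := by
  intro j
  fun_induction scanQuote s n q j <;> omega

-- ''.join('\n' if c == '\n' else ' ' for c in seg)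
def blankSeg (xs : List Char) : List Char := xs.map (fun c => if c = '\n' then '\n' else ' ')

def stripBLoop (s : List Char) (n : Nat) (i : Nat) : List Char :=
  if h : i < n then
    let ch := s.getD i ' '
    if ch = '/' ∧ i + 1 < n ∧ s.getD (i+1) ' ' = '/' then
      let j := (findCharFrom s n '\n' (i+2)).getD n
      List.replicate (j - i) ' ' ++ stripBLoop s n j
    else if ch = '/' ∧ i + 1 < n ∧ s.getD (i+1) ' ' = '*' then
      let e := match findStarSlashFrom s n (i+2) with | some j => j + 2 | none => n
      blankSeg ((s.drop i).take (e - i)) ++ stripBLoop s n e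
    else if ch = '"' ∨ ch = '\'' then
      let j := scanQuote s n ch (i+1)
      (s.drop i).take (j - i) ++ stripBLoop s n j
    else if ch = '`' then
      let e := match findCharFrom s n '`' (i+1) with | some j => j + 1 | none => n
      (s.drop i).take (e - i) ++ stripBLoop s n e
    else
      ch :: stripBLoop s n (i+1)
  else []
termination_by n - i
decreasing_by
  · rcases hf : findCharFrom s n '\n' (i+2) with _ | m
    · simp [hf]; omega
    · have := findCharFrom_some hf; simp [hf]; omega
  · rcases hf : findStarSlashFrom s n (i+2) with _ | m
    · simp [hf]; omega
    · obtain ⟨h1,h2,-,-⟩ := findStarSlashFrom_some hf; simp [hf]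
      have hx : i < m + 2 := by omega
      exact Nat.sub_lt_sub_left h hx
  · have : i + 1 ≤ scanQuote s n (s.getD i ' ') (i+1) := scanQuote_ge
    omega
  · rcases hf : findCharFrom s n '`' (i+1) with _ | m
    · simp [hf]; omega
    · obtain ⟨h1,h2,-⟩ := findCharFrom_some hf; simp [hf]
      have hx : i < m + 1 := by omega
      exact Nat.sub_lt_sub_left h hx
  · omega

def strip_go_comments_py_alt (content : String) : String :=
  String.mk (stripBLoop content.toList content.toList.length 0)

-- ===== PRECONDITION & SPEC =====
def Spec_strip_go_comments_py (content : String) (out : String) : Prop := out = strip_go_comments_py_alt content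
instance (content : String) (out : String) : Decidable (Spec_strip_go_comments_py content out) := by unfold Spec_strip_go_comments_py; infer_instance

-- ===== CLAIM (what is proved, stated in full; the proofs are below) =====
def Claim_equal_strip_go_comments_py : Prop := ∀ (content : String), Dom_strip_go_comments_py content → Spec_strip_go_comments_py content (strip_go_comments_py content)

-- ===== LEMMAS AND PROOFS =====

theorem scanQuote_le {s : List Char} {n : Nat} {q : Char} :
    ∀ {j : Nat}, j ≤ n → scanQuote s n q j ≤ n := by
  intro j
  fun_induction scanQuote s n q j with
  | case1 x h cv hc ih => intro _; exact ih (by have := hc.2; omega)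
  | case2 x h cv hc hq => omega
  | case3 x h cv hc hq ih => intro _; exact ih (by omega)
  | case4 x h => omega


-- list utilities
theorem drop_cons_getD (s : List Char) {j : Nat} (h : j < s.length) :
    s.drop j = s.getD j ' ' :: s.drop (j+1) := by
  rw [List.drop_eq_getElem_cons h, List.getD_eq_getElem _ _ h]

theorem set_at (p : List Char) (c x : Char) (rest : List Char) :
    (p ++ c :: rest).set p.length x = p ++ x :: rest := by
  induction p with
  | nil => rfl
  | cons a p ih => simpa using ih

theorem set_at1 (p : List Char) (c d x : Char) (rest : List Char) :
    (p ++ c :: d :: rest).set (p.length + 1) x = p ++ c :: x :: rest := by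
  induction p with
  | nil => rfl
  | cons a p ih => simpa using ih

theorem append_snoc_rep (p : List Char) (c : Char) {a b : Nat} (h : a + 1 = b) :
    (p ++ [c]) ++ List.replicate a c = p ++ List.replicate b c := by
  subst h; simp [List.replicate_succ]

-- one-step unfoldings of A's loop (one per state, plus termination)
theorem stA_stop (s : List Char) (out : List Char) (i st : Nat) (h : ¬ i < s.length) :
    stripALoop s s.length out i st = out := by
  rw [stripALoop, dif_neg h]

theorem stA_step0 (s : List Char) (out : List Char) (i : Nat) (h : i < s.length) :
    stripALoop s s.length out i 0 =
      (if s.getD i ' ' = '/' ∧ i + 1 < s.length ∧ s.getD (i+1) ' ' = '/' then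
         stripALoop s s.length ((out.set i ' ').set (i+1) ' ') (i+2) 1
       else if s.getD i ' ' = '/' ∧ i + 1 < s.length ∧ s.getD (i+1) ' ' = '*' then
         stripALoop s s.length ((out.set i ' ').set (i+1) ' ') (i+2) 2
       else if s.getD i ' ' = '"' then stripALoop s s.length out (i+1) 3
       else if s.getD i ' ' = '`' then stripALoop s s.length out (i+1) 4
       else if s.getD i ' ' = '\'' then stripALoop s s.length out (i+1) 5
       else stripALoop s s.length out (i+1) 0) := by
  rw [stripALoop, dif_pos h]; rfl

theorem stA_step1 (s : List Char) (out : List Char) (i : Nat) (h : i < s.length) :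
    stripALoop s s.length out i 1 =
      (if s.getD i ' ' = '\n' then stripALoop s s.length out (i+1) 0
       else stripALoop s s.length (out.set i ' ') (i+1) 1) := by
  rw [stripALoop, dif_pos h]; rfl

theorem stA_step2 (s : List Char) (out : List Char) (i : Nat) (h : i < s.length) :
    stripALoop s s.length out i 2 =
      (if s.getD i ' ' = '*' ∧ i + 1 < s.length ∧ s.getD (i+1) ' ' = '/' then
         stripALoop s s.length ((out.set i ' ').set (i+1) ' ') (i+2) 0
       else if s.getD i ' ' = '\n' then stripALoop s s.length out (i+1) 2
       else stripALoop s s.length (out.set i ' ') (i+1) 2) := by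
  rw [stripALoop, dif_pos h]; rfl

theorem stA_step3 (s : List Char) (out : List Char) (i : Nat) (h : i < s.length) :
    stripALoop s s.length out i 3 =
      (if s.getD i ' ' = '\\' ∧ i + 1 < s.length then stripALoop s s.length out (i+2) 3
       else if s.getD i ' ' = '"' then stripALoop s s.length out (i+1) 0
       else stripALoop s s.length out (i+1) 3) := by
  rw [stripALoop, dif_pos h]; rfl

theorem stA_step4 (s : List Char) (out : List Char) (i : Nat) (h : i < s.length) :
    stripALoop s s.length out i 4 =
      (if s.getD i ' ' = '`' then stripALoop s s.length out (i+1) 0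
       else stripALoop s s.length out (i+1) 4) := by
  rw [stripALoop, dif_pos h]; rfl

theorem stA_step5 (s : List Char) (out : List Char) (i : Nat) (h : i < s.length) :
    stripALoop s s.length out i 5 =
      (if s.getD i ' ' = '\\' ∧ i + 1 < s.length then stripALoop s s.length out (i+2) 5
       else if s.getD i ' ' = '\'' then stripALoop s s.length out (i+1) 0
       else stripALoop s s.length out (i+1) 5) := by
  rw [stripALoop, dif_pos h]; rfl

-- one-step unfoldings of B's loop
theorem stB_stop (s : List Char) (i : Nat) (h : ¬ i < s.length) :
    stripBLoop s s.length i = [] := by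
  rw [stripBLoop, dif_neg h]

theorem stB_step (s : List Char) (i : Nat) (h : i < s.length) :
    stripBLoop s s.length i =
      (if s.getD i ' ' = '/' ∧ i + 1 < s.length ∧ s.getD (i+1) ' ' = '/' then
         List.replicate ((findCharFrom s s.length '\n' (i+2)).getD s.length - i) ' ' ++
           stripBLoop s s.length ((findCharFrom s s.length '\n' (i+2)).getD s.length)
       else if s.getD i ' ' = '/' ∧ i + 1 < s.length ∧ s.getD (i+1) ' ' = '*' then
         blankSeg ((s.drop i).take ((match findStarSlashFrom s s.length (i+2) with
            | some j => j + 2 | none => s.length) - i)) ++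
           stripBLoop s s.length (match findStarSlashFrom s s.length (i+2) with
            | some j => j + 2 | none => s.length)
       else if s.getD i ' ' = '"' ∨ s.getD i ' ' = '\'' then
         (s.drop i).take (scanQuote s s.length (s.getD i ' ') (i+1) - i) ++
           stripBLoop s s.length (scanQuote s s.length (s.getD i ' ') (i+1))
       else if s.getD i ' ' = '`' then
         (s.drop i).take ((match findCharFrom s s.length '`' (i+1) with
            | some j => j + 1 | none => s.length) - i) ++
           stripBLoop s s.length (match findCharFrom s s.length '`' (i+1) with
            | some j => j + 1 | none => s.length)
       else
         s.getD i ' ' :: stripBLoop s s.length (i+1)) := by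
  rw [stripBLoop, dif_pos h]

-- A's state-3 loop (double-quoted string) reaches state 0 exactly at scanQuote, out untouched
theorem stA_state3 (s : List Char) :
    ∀ j (out : List Char),
      stripALoop s s.length out j 3 = stripALoop s s.length out (scanQuote s s.length '"' j) 0 := by
  intro j
  fun_induction scanQuote s s.length '"' j with
  | case1 x h cv hc ih =>
      intro out
      rw [stA_step3 s out x h, if_pos hc]
      exact ih out
  | case2 x h cv hc hq =>
      intro out
      rw [stA_step3 s out x h, if_neg hc, if_pos hq]
  | case3 x h cv hc hq ih =>
      intro out
      rw [stA_step3 s out x h, if_neg hc, if_neg hq]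
      exact ih out
  | case4 x h =>
      intro out
      rw [stA_stop s out x 3 h, stA_stop s out x 0 h]

-- A's state-5 loop (rune literal), same shape
theorem stA_state5 (s : List Char) :
    ∀ j (out : List Char),
      stripALoop s s.length out j 5 = stripALoop s s.length out (scanQuote s s.length '\'' j) 0 := by
  intro j
  fun_induction scanQuote s s.length '\'' j with
  | case1 x h cv hc ih =>
      intro out
      rw [stA_step5 s out x h, if_pos hc]
      exact ih out
  | case2 x h cv hc hq =>
      intro out
      rw [stA_step5 s out x h, if_neg hc, if_pos hq]
  | case3 x h cv hc hq ih =>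
      intro out
      rw [stA_step5 s out x h, if_neg hc, if_neg hq]
      exact ih out
  | case4 x h =>
      intro out
      rw [stA_stop s out x 5 h, stA_stop s out x 0 h]

-- A's state-4 loop (raw string), out untouched, ends just past the closing backtick
theorem stA_state4 (s : List Char) :
    ∀ j (out : List Char),
      stripALoop s s.length out j 4 =
        stripALoop s s.length out
          (match findCharFrom s s.length '`' j with | some m => m + 1 | none => s.length) 0 := by
  intro j
  fun_induction findCharFrom s s.length '`' j with
  | case1 x h hc =>
      intro out
      rw [stA_step4 s out x h, if_pos hc]
  | case2 x h hc ih =>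
      intro out
      rw [stA_step4 s out x h, if_neg hc]
      exact ih out
  | case3 x h =>
      intro out
      rw [stA_stop s out x 4 h]
      have hn : ¬ s.length < s.length := by omega
      rw [stA_stop s out s.length 0 hn]

-- A's state-1 loop (line comment): blanks up to the newline found by findCharFrom
theorem stA_state1 (s : List Char) :
    ∀ j (p : List Char), p.length = j →
      stripALoop s s.length (p ++ s.drop j) j 1 =
        match findCharFrom s s.length '\n' j with
        | some m => stripALoop s s.length ((p ++ List.replicate (m - j) ' ') ++ s.drop m) (m+1) 0
        | none => p ++ List.replicate (s.length - j) ' ' := by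
  intro j
  fun_induction findCharFrom s s.length '\n' j with
  | case1 x h hc =>
      intro p hp
      rw [stA_step1 s _ x h, if_pos hc]
      simp
  | case2 x h hc ih =>
      intro p hp
      rw [stA_step1 s _ x h, if_neg hc]
      rw [drop_cons_getD s h]
      have hset : (p ++ s.getD x ' ' :: s.drop (x+1)).set x ' ' = (p ++ [' ']) ++ s.drop (x+1) := by
        rw [← hp, set_at]; simp
      rw [hset]
      rw [ih (p ++ [' ']) (by simp [hp])]
      rcases hf : findCharFrom s s.length '\n' (x+1) with _ | m
      · simp only
        rw [append_snoc_rep p ' ' (show s.length - (x+1) + 1 = s.length - x by omega)]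
      · obtain ⟨hm1, hm2, hm3⟩ := findCharFrom_some hf
        simp only
        rw [append_snoc_rep p ' ' (show m - (x+1) + 1 = m - x by omega)]
  | case3 x h =>
      intro p hp
      rw [stA_stop s _ x 1 h]
      simp only
      rw [List.drop_eq_nil_of_le (by omega), show s.length - x = 0 by omega]
      simp

-- A's state-2 loop (block comment): blanks (newlines kept) until */ or EOF
theorem stA_state2 (s : List Char) :
    ∀ j (p : List Char), p.length = j →
      stripALoop s s.length (p ++ s.drop j) j 2 =
        match findStarSlashFrom s s.length j with
        | some m =>
            stripALoop s s.length
              ((p ++ blankSeg ((s.drop j).take (m + 2 - j))) ++ s.drop (m+2)) (m+2) 0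
        | none => p ++ blankSeg (s.drop j) := by
  intro j
  fun_induction findStarSlashFrom s s.length j with
  | case1 x h hc =>
      intro p hp
      have hx : x < s.length := by omega
      rw [stA_step2 s _ x hx, if_pos (⟨hc.1, h, hc.2⟩ :
        s.getD x ' ' = '*' ∧ x + 1 < s.length ∧ s.getD (x+1) ' ' = '/')]
      rw [drop_cons_getD s hx, drop_cons_getD s h]
      have hset : ((p ++ s.getD x ' ' :: s.getD (x+1) ' ' :: s.drop (x+2)).set x ' ').set (x+1) ' '
          = (p ++ [' ', ' ']) ++ s.drop (x+2) := by
        conv_lhs => rw [← hp, set_at]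
        rw [← hp, set_at1]
        simp
      rw [hset]
      have h1 := hc.1; have h2 := hc.2
      simp only [List.getD_eq_getElem?_getD] at h1 h2
      simp [blankSeg, h1, h2, show x + 2 - x = 2 by omega, List.append_assoc]
  | case2 x h hc ih =>
      intro p hp
      have hx : x < s.length := by omega
      have hcond : ¬ (s.getD x ' ' = '*' ∧ x + 1 < s.length ∧ s.getD (x+1) ' ' = '/') := by
        intro hk; exact hc ⟨hk.1, hk.2.2⟩
      rw [stA_step2 s _ x hx, if_neg hcond]
      by_cases hnl : s.getD x ' ' = '\n'
      · rw [if_pos hnl]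
        rw [drop_cons_getD s hx]
        have hout : p ++ s.getD x ' ' :: s.drop (x+1) = (p ++ [s.getD x ' ']) ++ s.drop (x+1) := by
          simp
        rw [hout, ih (p ++ [s.getD x ' ']) (by simp [hp])]
        rcases hf : findStarSlashFrom s s.length (x+1) with _ | m
        · have h1 := hnl; simp only [List.getD_eq_getElem?_getD] at h1
          simp [blankSeg, h1, List.append_assoc]
        · obtain ⟨hm1, hm2, hm3, hm4⟩ := findStarSlashFrom_some hf
          simp only [show m + 2 - x = (m + 2 - (x+1)) + 1 by omega]
          have h1 := hnl; simp only [List.getD_eq_getElem?_getD] at h1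
          simp [blankSeg, h1, List.append_assoc]
      · rw [if_neg hnl]
        rw [drop_cons_getD s hx]
        have hset : (p ++ s.getD x ' ' :: s.drop (x+1)).set x ' ' = (p ++ [' ']) ++ s.drop (x+1) := by
          rw [← hp, set_at]; simp
        rw [hset, ih (p ++ [' ']) (by simp [hp])]
        rcases hf : findStarSlashFrom s s.length (x+1) with _ | m
        · have h1 := hnl; simp only [List.getD_eq_getElem?_getD] at h1
          simp [blankSeg, h1, List.append_assoc]
        · obtain ⟨hm1, hm2, hm3, hm4⟩ := findStarSlashFrom_some hf
          simp only [show m + 2 - x = (m + 2 - (x+1)) + 1 by omega]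
          have h1 := hnl; simp only [List.getD_eq_getElem?_getD] at h1
          simp [blankSeg, h1, List.append_assoc]
  | case3 x h =>
      intro p hp
      by_cases hx : x < s.length
      · -- x = s.length - 1 : one final step, then the loop ends
        have hcond : ¬ (s.getD x ' ' = '*' ∧ x + 1 < s.length ∧ s.getD (x+1) ' ' = '/') := by
          intro hk; omega
        rw [stA_step2 s _ x hx, if_neg hcond]
        have hstop : ¬ x + 1 < s.length := by omega
        by_cases hnl : s.getD x ' ' = '\n'
        · rw [if_pos hnl, drop_cons_getD s hx, stA_stop s _ (x+1) 2 hstop]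
          rw [List.drop_eq_nil_of_le (by omega)]
          have h1 := hnl; simp only [List.getD_eq_getElem?_getD] at h1
          simp [blankSeg, h1]
        · rw [if_neg hnl]
          rw [drop_cons_getD s hx]
          have hset : (p ++ s.getD x ' ' :: s.drop (x+1)).set x ' ' = (p ++ [' ']) ++ s.drop (x+1) := by
            rw [← hp, set_at]; simp
          rw [hset, stA_stop s _ (x+1) 2 hstop]
          rw [List.drop_eq_nil_of_le (by omega)]
          have h1 := hnl; simp only [List.getD_eq_getElem?_getD] at h1
          simp [blankSeg, h1]
      · rw [stA_stop s _ x 2 hx]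
        rw [List.drop_eq_nil_of_le (by omega)]
        simp [blankSeg]

-- the decomposition used for verbatim chunks
theorem drop_split (s : List Char) {i e : Nat} (hie : i ≤ e) :
    s.drop i = (s.drop i).take (e - i) ++ s.drop e := by
  have h := List.take_append_drop (e - i) (s.drop i)
  rw [List.drop_drop] at h
  rw [show i + (e - i) = e from by omega] at h
  exact h.symm

theorem take_len_drop (s : List Char) {i e : Nat} (hie : i ≤ e) (hen : e ≤ s.length) :
    ((s.drop i).take (e - i)).length = e - i := by
  simp [List.length_take, List.length_drop]
  omega

theorem rep_space_merge {a b : Nat} (h : a + 2 = b) (t : List Char) :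
    ' ' :: ' ' :: (List.replicate a ' ' ++ t) = List.replicate b ' ' ++ t := by
  rw [← h, show a + 2 = 2 + a from by omega, List.replicate_add]
  simp

theorem rep_space_merge' {a b : Nat} (h : a + 2 = b) :
    ' ' :: ' ' :: List.replicate a ' ' = List.replicate b ' ' := by
  simpa using rep_space_merge h []

theorem mainA_eq_B (s : List Char) :
    ∀ k i (p : List Char), s.length - i ≤ k → p.length = i →
      stripALoop s s.length (p ++ s.drop i) i 0 = p ++ stripBLoop s s.length i := by
  intro k
  induction k with
  | zero =>
      intro i p hk hp
      have hi : ¬ i < s.length := by omega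
      rw [stA_stop s _ i 0 hi, stB_stop s i hi, List.drop_eq_nil_of_le (by omega)]
  | succ k ih =>
      intro i p hk hp
      by_cases hi : i < s.length
      case neg =>
        rw [stA_stop s _ i 0 hi, stB_stop s i hi, List.drop_eq_nil_of_le (by omega)]
      case pos =>
      rw [stA_step0 s _ i hi, stB_step s i hi]
      by_cases h1 : s.getD i ' ' = '/' ∧ i + 1 < s.length ∧ s.getD (i+1) ' ' = '/'
      · -- line comment
        rw [if_pos h1, if_pos h1]
        rw [drop_cons_getD s hi, drop_cons_getD s h1.2.1]
        have hset : ((p ++ s.getD i ' ' :: s.getD (i+1) ' ' :: s.drop (i+2)).set i ' ').set (i+1) ' '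
            = (p ++ [' ', ' ']) ++ s.drop (i+2) := by
          conv_lhs => rw [← hp, set_at]
          rw [← hp, set_at1]
          simp
        rw [hset]
        rw [stA_state1 s (i+2) (p ++ [' ', ' ']) (by simp [hp])]
        rcases hf : findCharFrom s s.length '\n' (i+2) with _ | m
        · simp only [hf, Option.getD_none]
          rw [stB_stop s s.length (by omega)]
          rw [show s.length - i = (s.length - (i+2)) + 2 from by omega]
          simp [rep_space_merge' rfl, List.append_assoc]
        · obtain ⟨hm1, hm2, hm3⟩ := findCharFrom_some hf
          simp only [hf, Option.getD_some]
          rw [drop_cons_getD s hm2, hm3]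
          have hq : (p ++ [' ', ' '] ++ List.replicate (m - (i+2)) ' ') ++ '\n' :: s.drop (m+1)
              = ((p ++ [' ', ' '] ++ List.replicate (m - (i+2)) ' ' ++ ['\n']) ++ s.drop (m+1)) := by
            simp [List.append_assoc]
          rw [hq]
          rw [ih (m+1) _ (by omega) (by simp [hp]; omega)]
          rw [stB_step s m hm2]
          rw [if_neg (fun hx => by rw [hm3] at hx; exact absurd hx.1 (by decide)),
              if_neg (fun hx => by rw [hm3] at hx; exact absurd hx.1 (by decide)),
              if_neg (fun hx => by rw [hm3] at hx; rcases hx with hx | hx <;> exact absurd hx (by decide)),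
              if_neg (fun hx => by rw [hm3] at hx; exact absurd hx (by decide))]
          rw [hm3, show m - i = (m - (i+2)) + 2 from by omega]
          rw [← rep_space_merge rfl]
          simp [List.append_assoc]
      · rw [if_neg h1, if_neg h1]
        by_cases h2 : s.getD i ' ' = '/' ∧ i + 1 < s.length ∧ s.getD (i+1) ' ' = '*'
        · -- block comment
          rw [if_pos h2, if_pos h2]
          rw [drop_cons_getD s hi, drop_cons_getD s h2.2.1]
          have hset : ((p ++ s.getD i ' ' :: s.getD (i+1) ' ' :: s.drop (i+2)).set i ' ').set (i+1) ' '
              = (p ++ [' ', ' ']) ++ s.drop (i+2) := by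
            conv_lhs => rw [← hp, set_at]
            rw [← hp, set_at1]
            simp
          rw [hset]
          rw [stA_state2 s (i+2) (p ++ [' ', ' ']) (by simp [hp])]
          have hA := h2.1; have hB := h2.2.2
          simp only [List.getD_eq_getElem?_getD] at hA hB
          rcases hf : findStarSlashFrom s s.length (i+2) with _ | m
          · simp only [hf]
            rw [stB_stop s s.length (by omega)]
            rw [List.take_of_length_le (by simp; omega)]
            simp [blankSeg, hA, hB, List.append_assoc]
          · obtain ⟨hm1, hm2, hm3, hm4⟩ := findStarSlashFrom_some hf
            simp only [hf]
            rw [ih (m+2) _ (by omega)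
                (by simp [blankSeg, hp, List.length_take, List.length_drop]; omega)]
            rw [show m + 2 - i = (m + 2 - (i+2)) + 2 from by omega]
            simp [blankSeg, hA, hB, List.append_assoc]
        · rw [if_neg h2, if_neg h2]
          by_cases h3 : s.getD i ' ' = '"' ∨ s.getD i ' ' = '\''
          · rw [if_pos h3]
            rcases h3 with hq | hq
            · -- double-quoted string
              rw [if_pos hq, hq]
              rw [stA_state3 s (i+1) (p ++ s.drop i)]
              have hge : i + 1 ≤ scanQuote s s.length '"' (i+1) := scanQuote_ge
              have hle : scanQuote s s.length '"' (i+1) ≤ s.length := scanQuote_le (by omega)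
              conv_lhs => rw [drop_split s (show i ≤ scanQuote s s.length '"' (i+1) from by omega),
                  ← List.append_assoc]
              rw [ih (scanQuote s s.length '"' (i+1)) _ (by omega)
                  (by rw [List.length_append, hp, take_len_drop s (by omega) hle]; omega)]
              simp [List.append_assoc]
            · -- rune literal
              have hq2 : ¬ s.getD i ' ' = '"' := by rw [hq]; decide
              rw [if_neg hq2, if_pos hq, hq]
              rw [stA_state5 s (i+1) (p ++ s.drop i)]
              have hge : i + 1 ≤ scanQuote s s.length '\'' (i+1) := scanQuote_ge
              have hle : scanQuote s s.length '\'' (i+1) ≤ s.length := scanQuote_le (by omega)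
              conv_lhs => rw [drop_split s (show i ≤ scanQuote s s.length '\'' (i+1) from by omega),
                  ← List.append_assoc]
              rw [ih (scanQuote s s.length '\'' (i+1)) _ (by omega)
                  (by rw [List.length_append, hp, take_len_drop s (by omega) hle]; omega)]
              simp [List.append_assoc]
          · rw [if_neg h3]
            have h3a : ¬ s.getD i ' ' = '"' := fun hx => h3 (Or.inl hx)
            have h3b : ¬ s.getD i ' ' = '\'' := fun hx => h3 (Or.inr hx)
            rw [if_neg h3a]
            by_cases h4 : s.getD i ' ' = '`'
            · -- raw string
              rw [if_pos h4, if_pos h4]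
              rw [stA_state4 s (i+1) (p ++ s.drop i)]
              rcases hf : findCharFrom s s.length '`' (i+1) with _ | m
              · simp only [hf]
                rw [stA_stop s _ s.length 0 (by omega), stB_stop s s.length (by omega)]
                rw [List.take_of_length_le (by simp)]
                simp
              · obtain ⟨hm1, hm2, hm3⟩ := findCharFrom_some hf
                simp only [hf]
                conv_lhs => rw [drop_split s (show i ≤ m + 1 from by omega), ← List.append_assoc]
                rw [ih (m+1) _ (by omega)
                    (by rw [List.length_append, hp, take_len_drop s (by omega) (by omega)]; omega)]
                simp [List.append_assoc]
            · -- plain code character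
              rw [if_neg h4, if_neg h4, if_neg h3b]
              rw [drop_cons_getD s hi,
                  show p ++ s.getD i ' ' :: s.drop (i+1) = (p ++ [s.getD i ' ']) ++ s.drop (i+1)
                    from by simp]
              rw [ih (i+1) _ (by omega) (by simp [hp])]
              simp

-- ===== VERDICT (by name: the statement is the Claim_ definition above) =====
theorem strip_go_comments_py_spec : Claim_equal_strip_go_comments_py := by
  intro content _
  unfold Spec_strip_go_comments_py strip_go_comments_py strip_go_comments_py_alt
  have h0 := mainA_eq_B content.toList content.toList.length 0 [] (by omega) rfl
  simp only [List.nil_append, List.drop_zero] at h0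
  exact congrArg String.mk h0
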